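-- pv_equiv track=rewrite | github.com/Yubkush/traffic_alert_bot | src/web_parser.py | find_date_time
-- ===== SOURCE A (Python) =====
-- def find_date_time(words: list[str]):
--     date = None
--     time = None
--     for string in words:
--         parts = string.split('/')
--         if len(parts) == 3 and all(part.isdigit() for part in parts):
--             [day, month, year] = parts
--             # add "0" padding for day & month
--             if len(day) == 1:
--                 day = "0" + day
--             if len(month) == 1:
--                 month = "0" + month
--             # add "20" if needed in year
--             if len(year) == 2:
--                 year = "20" + year
--             date = f"{day}/{month}/{year}"
--             continue
--
--         parts = string.split(':')
--         if len(parts) == 2 and all(part.isdigit() for part in parts):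
--             time = string
--             continue
--
--     return date, time
-- ===== SOURCE B (Python) =====
-- def _try_date(word):
--     parts = word.split('/')
--     if len(parts) == 3 and all(p.isdigit() for p in parts):
--         d, m, y = parts
--         return f"{d.zfill(2)}/{m.zfill(2)}/{'20' + y if len(y) == 2 else y}"
--     return None
--
--
-- def _try_time(word):
--     parts = word.split(':')
--     if len(parts) == 2 and all(p.isdigit() for p in parts):
--         return word
--     return None
--
--
-- def find_date_time(words: list[str]):
--     date = None
--     time = None
--     for word in reversed(words):
--         if date is None:
--             date = _try_date(word)
--         if time is None:
--             time = _try_time(word)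
--         if date is not None and time is not None:
--             break
--     return date, time
-- ===== Notes on version B (the rewrite author's own statement) =====
-- stated objective: alternative
-- what changed: A's single forward loop that keeps overwriting date/time with the latest match is replaced by a reverse scan with Option-returning helpers that fills each slot only once and stops as soon as both the date and the time have been found.
import Mathlib
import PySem

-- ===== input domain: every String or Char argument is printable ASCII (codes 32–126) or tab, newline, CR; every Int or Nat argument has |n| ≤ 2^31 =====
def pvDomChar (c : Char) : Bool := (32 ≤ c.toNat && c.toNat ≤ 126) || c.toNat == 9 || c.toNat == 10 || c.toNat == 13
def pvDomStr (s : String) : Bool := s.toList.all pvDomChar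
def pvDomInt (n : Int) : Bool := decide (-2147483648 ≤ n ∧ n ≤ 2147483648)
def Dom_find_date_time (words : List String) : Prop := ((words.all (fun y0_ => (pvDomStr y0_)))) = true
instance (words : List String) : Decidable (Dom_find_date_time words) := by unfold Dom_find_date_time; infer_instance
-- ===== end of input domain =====

-- B replaces A's forward accumulate-last loop by a reverse scan with early exit (helpers returning Option); same return value, alternative decomposition.

-- ===== PORT A =====
-- one iteration of A's for-loop over (date, time)
def pvStepA (st : Option String × Option String) (s : String) : Option String × Option String :=
  let parts := PySem.Chars.splitOn s.toList ['/']
  if parts.length = 3 ∧ parts.all PySem.Chars.strIsdigit = true then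
    match parts with
    | [day, month, year] =>
      let day := if day.length = 1 then '0' :: day else day
      let month := if month.length = 1 then '0' :: month else month
      let year := if year.length = 2 then '2' :: '0' :: year else year
      (some (String.ofList (day ++ '/' :: (month ++ '/' :: year))), st.2)
    | _ => st
  else
    let parts := PySem.Chars.splitOn s.toList [':']
    if parts.length = 2 ∧ parts.all PySem.Chars.strIsdigit = true then
      (st.1, some s)
    else st

def find_date_time (words : List String) : Option String × Option String :=
  words.foldl pvStepA (none, none)

-- ===== PORT B =====
-- Source B's _try_date
def pvTryDate (w : String) : Option String :=
  let parts := PySem.Chars.splitOn w.toList ['/']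
  if parts.length = 3 ∧ parts.all PySem.Chars.strIsdigit = true then
    match parts with
    | [d, m, y] =>
      some (String.ofList (PySem.Chars.zfill d 2 ++ '/' ::
        (PySem.Chars.zfill m 2 ++ '/' :: (if y.length = 2 then '2' :: '0' :: y else y))))
    | _ => none
  else none

-- Source B's _try_time
def pvTryTime (w : String) : Option String :=
  let parts := PySem.Chars.splitOn w.toList [':']
  if parts.length = 2 ∧ parts.all PySem.Chars.strIsdigit = true then some w else none

-- Source B's reverse loop with early exit
def pvLoopB : List String → Option String → Option String → Option String × Option String
  | [], date, time => (date, time)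
  | w :: ws, date, time =>
    let date := if date.isNone then pvTryDate w else date
    let time := if time.isNone then pvTryTime w else time
    if date.isSome = true ∧ time.isSome = true then (date, time) else pvLoopB ws date time

def find_date_time_alt (words : List String) : Option String × Option String :=
  pvLoopB words.reverse none none

-- ===== PRECONDITION & SPEC =====
def Spec_find_date_time (words : List String) (out : Option String × Option String) : Prop := out = find_date_time_alt words
instance (words : List String) (out : Option String × Option String) : Decidable (Spec_find_date_time words out) := by unfold Spec_find_date_time; infer_instance

-- ===== CLAIM (what is proved, stated in full; the proofs are below) =====
def Claim_equal_find_date_time : Prop := ∀ (words : List String), Dom_find_date_time words → Spec_find_date_time words (find_date_time words)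

-- ===== LEMMAS AND PROOFS =====

-- clean recursion equal to PySem.Chars.splitOn on a one-char separator
def pvSplit (c : Char) : List Char → List Char → List (List Char)
  | [], cur => [cur.reverse]
  | x :: rest, cur => if x = c then cur.reverse :: pvSplit c rest [] else pvSplit c rest (x :: cur)

theorem pvSplit_go (c : Char) : ∀ (fuel : Nat) (l cur : List Char) (acc : List (List Char)),
    l.length < fuel →
    PySem.Chars.splitOn.go [c] fuel l cur acc = acc.reverse ++ pvSplit c l cur := by
  intro fuel
  induction fuel with
  | zero => intro l cur acc h; omega
  | succ n ih =>
    intro l cur acc h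
    cases l with
    | nil => simp [PySem.Chars.splitOn.go, pvSplit]
    | cons x rest =>
      simp only [PySem.Chars.splitOn.go, pvSplit]
      by_cases hx : x = c
      · subst hx
        simp only [List.isPrefixOf, beq_self_eq_true, Bool.true_and, if_pos, List.length_cons,
          List.length_nil, List.drop_succ_cons, List.drop_zero]
        rw [ih rest [] (cur.reverse :: acc) (by simpa using Nat.lt_of_succ_lt_succ h)]
        simp
      · have : ([c].isPrefixOf (x :: rest)) = false := by
          simp [List.isPrefixOf, hx]
          intro hh; exact absurd hh.symm hx
        rw [this]
        simp only [Bool.false_eq_true, if_neg, if_false]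
        rw [ih rest (x :: cur) acc (by simpa using Nat.lt_of_succ_lt_succ h)]
        simp [hx]

theorem splitOn_eq_pvSplit (c : Char) (cs : List Char) :
    PySem.Chars.splitOn cs [c] = pvSplit c cs [] := by
  have := pvSplit_go c (cs.length + 1) cs [] [] (by omega)
  simpa [PySem.Chars.splitOn] using this

theorem pvSplit_ne_nil (c : Char) : ∀ (l cur : List Char), pvSplit c l cur ≠ [] := by
  intro l
  induction l with
  | nil => intro cur; simp [pvSplit]
  | cons x rest ih =>
    intro cur
    simp only [pvSplit]
    by_cases hx : x = c
    · simp [hx]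
    · simpa [hx] using ih (x :: cur)

theorem pvSplit_one (c : Char) : ∀ (l cur p : List Char),
    pvSplit c l cur = [p] → p = cur.reverse ++ l := by
  intro l
  induction l with
  | nil => intro cur p h; simpa [pvSplit] using h.symm
  | cons x rest ih =>
    intro cur p h
    by_cases hx : x = c
    · subst hx
      simp only [pvSplit, if_pos rfl] at h
      obtain ⟨h1, h2⟩ := List.cons.inj h
      exact absurd h2 (pvSplit_ne_nil x rest [])
    · simp only [pvSplit, if_neg hx] at h
      have := ih (x :: cur) p h
      simpa using this

theorem pvSplit_two (c : Char) : ∀ (l cur p q : List Char),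
    pvSplit c l cur = [p, q] → cur.reverse ++ l = p ++ c :: q := by
  intro l
  induction l with
  | nil => intro cur p q h; simp [pvSplit] at h
  | cons x rest ih =>
    intro cur p q h
    by_cases hx : x = c
    · subst hx
      simp only [pvSplit, if_pos rfl] at h
      obtain ⟨h1, h2⟩ := List.cons.inj h
      have hq := pvSplit_one x rest [] q h2
      simp at hq
      simp [h1, hq]
    · simp only [pvSplit, if_neg hx] at h
      have := ih (x :: cur) p q h
      simpa using this

theorem pvSplit_not_mem (c : Char) : ∀ (l cur : List Char), c ∉ l →
    pvSplit c l cur = [cur.reverse ++ l] := by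
  intro l
  induction l with
  | nil => intro cur h; simp [pvSplit]
  | cons x rest ih =>
    intro cur h
    have hx : x ≠ c := fun hh => h (by simp [hh])
    simp only [pvSplit, if_neg hx]
    have := ih (x :: cur) (fun hh => h (by simp [hh]))
    simpa using this

-- a word matching the date pattern matches no time pattern, and conversely
theorem pvDate_time_disjoint (cs : List Char) :
    ¬ (((PySem.Chars.splitOn cs ['/']).length = 3 ∧ (PySem.Chars.splitOn cs ['/']).all PySem.Chars.strIsdigit = true)
       ∧ ((PySem.Chars.splitOn cs [':']).length = 2 ∧ (PySem.Chars.splitOn cs [':']).all PySem.Chars.strIsdigit = true)) := by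
  rintro ⟨⟨hl3, hd3⟩, ⟨hl2, hd2⟩⟩
  rw [splitOn_eq_pvSplit] at hl3 hl2 hd2
  obtain ⟨p, q, hpq⟩ : ∃ p q, pvSplit ':' cs [] = [p, q] := by
    match hE : pvSplit ':' cs [] with
    | [p, q] => exact ⟨p, q, rfl⟩
    | [] | [_] | _ :: _ :: _ :: _ => rw [hE] at hl2; simp at hl2
  have hcs : cs = p ++ ':' :: q := by
    have := pvSplit_two ':' cs [] p q hpq
    simpa using this
  have hdp : PySem.Chars.strIsdigit p = true ∧ PySem.Chars.strIsdigit q = true := by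
    rw [hpq] at hd2; simpa using hd2
  have hallp : ∀ x ∈ p, PySem.Chars.isdigit x = true := by
    have := hdp.1; simp [PySem.Chars.strIsdigit] at this; exact this.2
  have hallq : ∀ x ∈ q, PySem.Chars.isdigit x = true := by
    have := hdp.2; simp [PySem.Chars.strIsdigit] at this; exact this.2
  have hmem : '/' ∉ cs := by
    rw [hcs]
    intro hm
    rcases List.mem_append.mp hm with hm | hm
    · have := hallp _ hm; simp [PySem.Chars.isdigit] at this
    · rcases List.mem_cons.mp hm with hm | hm
      · simp at hm
      · have := hallq _ hm; simp [PySem.Chars.isdigit] at this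
  rw [pvSplit_not_mem '/' cs [] hmem] at hl3
  simp at hl3

theorem pvZfill_digits (d : List Char) (h : PySem.Chars.strIsdigit d = true) :
    PySem.Chars.zfill d 2 = if d.length = 1 then '0' :: d else d := by
  have hne : d ≠ [] := by
    intro hnil; rw [hnil] at h; simp [PySem.Chars.strIsdigit] at h
  by_cases h1 : d.length = 1
  · obtain ⟨a, ha⟩ := List.length_eq_one_iff.mp h1
    subst ha
    have hdig : PySem.Chars.isdigit a = true := by
      simpa [PySem.Chars.strIsdigit] using h
    have hsign : ¬ (a = '+' ∨ a = '-') := by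
      rintro (rfl | rfl) <;> simp [PySem.Chars.isdigit] at hdig
    simp [PySem.Chars.zfill, hsign, List.replicate]
  · have h2 : 2 ≤ d.length := by
      cases d with
      | nil => exact absurd rfl hne
      | cons x xs => cases xs with
        | nil => simp at h1
        | cons y ys => simp
    simp only [PySem.Chars.zfill]
    rw [if_pos (by exact_mod_cast h2), if_neg h1]

theorem pvStepA_eq (st : Option String × Option String) (w : String) :
    pvStepA st w = ((pvTryDate w).or st.1, (pvTryTime w).or st.2) := by
  unfold pvStepA pvTryDate pvTryTime
  by_cases hD : (PySem.Chars.splitOn w.toList ['/']).length = 3 ∧ (PySem.Chars.splitOn w.toList ['/']).all PySem.Chars.strIsdigit = true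
  · have hT : ¬ ((PySem.Chars.splitOn w.toList [':']).length = 2 ∧ (PySem.Chars.splitOn w.toList [':']).all PySem.Chars.strIsdigit = true) :=
      fun hT => pvDate_time_disjoint w.toList ⟨hD, hT⟩
    obtain ⟨d, m, y, hdmy⟩ : ∃ d m y, PySem.Chars.splitOn w.toList ['/'] = [d, m, y] := by
      match hE : PySem.Chars.splitOn w.toList ['/'] with
      | [d, m, y] => exact ⟨d, m, y, rfl⟩
      | [] | [_] | [_, _] | _ :: _ :: _ :: _ :: _ => rw [hE] at hD; simp at hD
    have hdig : PySem.Chars.strIsdigit d = true ∧ PySem.Chars.strIsdigit m = true ∧ PySem.Chars.strIsdigit y = true := by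
      have := hD.2; rw [hdmy] at this; simpa using this
    simp only [if_pos hD, if_neg hT, hdmy]
    rw [pvZfill_digits d hdig.1, pvZfill_digits m hdig.2.1]
    simp [hdig.1, hdig.2.1, hdig.2.2]
  · simp only [if_neg hD]
    by_cases hT : (PySem.Chars.splitOn w.toList [':']).length = 2 ∧ (PySem.Chars.splitOn w.toList [':']).all PySem.Chars.strIsdigit = true
    · rw [if_pos hT, if_pos hT]; simp
    · rw [if_neg hT, if_neg hT]; simp

theorem pvFoldA (l : List String) : ∀ (st : Option String × Option String),
    l.foldl pvStepA st = ((l.reverse.findSome? pvTryDate).or st.1, (l.reverse.findSome? pvTryTime).or st.2) := by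
  induction l with
  | nil => intro st; simp
  | cons w ws ih =>
    intro st
    simp only [List.foldl_cons, List.reverse_cons, List.findSome?_append]
    rw [ih (pvStepA st w), pvStepA_eq]
    simp only [List.findSome?, Option.or_assoc, Prod.mk.injEq]
    cases pvTryDate w <;> cases pvTryTime w <;> simp

theorem pvLoopB_eq (l : List String) : ∀ (d t : Option String),
    pvLoopB l d t = (d.or (l.findSome? pvTryDate), t.or (l.findSome? pvTryTime)) := by
  induction l with
  | nil => intro d t; simp [pvLoopB]
  | cons w ws ih =>
    intro d t
    simp only [pvLoopB]
    cases d <;> cases t <;>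
      simp only [Option.isNone_none, Option.isNone_some, if_true, if_false, Bool.false_eq_true,
        List.findSome?_cons, Option.some_or, Option.none_or, reduceIte] <;>
      split_ifs <;>
      simp_all [ih, Option.or_assoc] <;>
      cases hD : pvTryDate w <;> cases hT : pvTryTime w <;> simp_all [ih]

-- ===== VERDICT (by name: the statement is the Claim_ definition above) =====
theorem find_date_time_spec : Claim_equal_find_date_time := by
  intro words _
  unfold Spec_find_date_time find_date_time find_date_time_alt
  rw [pvFoldA, pvLoopB_eq]
  simp
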